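-- pv_equiv track=rewrite | github.com/chkp-orendi/Emojicrypt | legacy/testers/data_handler.py | generate_sorted_names
-- ===== SOURCE A (Python) =====
-- def next_letter_sequence():
--     def increment_string(s):
--         # Convert string to a list of characters
--         s = list(s)
--         i = len(s) - 1
--
--         while i >= 0:
--             if s[i] == 'Z':
--                 s[i] = 'A'
--                 i -= 1
--             else:
--                 s[i] = chr(ord(s[i]) + 1)
--                 return ''.join(s)
--
--         return ''.join(s)
--
--     # Initialize the string with 'A' repeated n times
--     current = 'X' * 5
--
--     while True:
--         yield current
--         current = increment_string(current)
--
-- def generate_sorted_names(list_of_words):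
--     list_of_words.sort()
--     encryption_text = {}
--     i=0
--     for word in next_letter_sequence():
--         encryption_text[word] = list_of_words[i]
--         i+=1
--         if (i == len(list_of_words)):
--             break
--     return encryption_text
-- ===== SOURCE B (Python) =====
-- def generate_sorted_names(list_of_words):
--     list_of_words.sort()
--     M = 26 ** 5
--     v0 = 23 * (26 ** 4 + 26 ** 3 + 26 ** 2 + 26 + 1)  # value of 'XXXXX' in base 26, A=0
--     encryption_text = {}
--     for i, word in enumerate(list_of_words):
--         v = (v0 + i) % M
--         key = ''
--         for _ in range(5):
--             key = chr(ord('A') + v % 26) + key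
--             v //= 26
--         encryption_text[key] = word
--     return encryption_text
-- ===== Notes on version B (the rewrite author's own statement) =====
-- stated objective: alternative
-- what changed: The iterative carry-increment string generator (next_letter_sequence/increment_string) is replaced by a closed-form encoder that computes each key arithmetically as the five base-26 digits of (value('XXXXX') + i) mod 26^5, driven by a single enumerate pass instead of a generator protocol.
-- outside the precondition, e.g. on generate_sorted_names([]): A raises IndexError, B returns {}
-- crash fix: On the empty list A raises IndexError (list_of_words[0]); B returns the empty dict. — e.g. on generate_sorted_names([]): A raises IndexError, B returns []
import Mathlib
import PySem

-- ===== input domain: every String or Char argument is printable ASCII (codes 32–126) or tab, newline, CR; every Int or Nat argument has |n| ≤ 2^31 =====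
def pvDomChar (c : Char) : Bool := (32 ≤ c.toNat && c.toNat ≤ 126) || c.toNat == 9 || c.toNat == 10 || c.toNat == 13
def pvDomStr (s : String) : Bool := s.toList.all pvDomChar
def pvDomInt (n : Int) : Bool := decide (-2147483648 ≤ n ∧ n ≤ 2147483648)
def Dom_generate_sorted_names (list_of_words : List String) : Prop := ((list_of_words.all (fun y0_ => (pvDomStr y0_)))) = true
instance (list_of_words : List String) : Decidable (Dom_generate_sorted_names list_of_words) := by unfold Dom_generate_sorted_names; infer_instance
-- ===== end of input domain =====

-- B changes only the key generator (closed-form base-26 encoding instead of carry-increment);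
-- equivalence is about the RETURN value; both A and B sort list_of_words in place.

-- ===== PORT A =====
-- increment_string's while loop scans from the rightmost character; ported as a
-- structural recursion over the reversed character list (exact on all inputs).
def pvIncrAux : List Char → List Char
  | [] => []
  | c :: rest => if c = 'Z' then 'A' :: pvIncrAux rest else Char.ofNat (c.toNat + 1) :: rest

def pvIncrementString (s : String) : String :=
  String.ofList (pvIncrAux s.toList.reverse).reverse

-- the for/break loop: assigns keys to the sorted words one by one, advancing the key
def pvLoopA : List String → PySem.Dict String String → String → PySem.Dict String String
  | [], d, _ => d
  | w :: ws, d, cur => pvLoopA ws (d.insert cur w) (pvIncrementString cur)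

def generate_sorted_names (list_of_words : List String) : List (String × String) :=
  (pvLoopA (PySem.List.sorted list_of_words (fun x => x) false) PySem.Dict.empty "XXXXX").items

-- ===== PORT B =====
-- for _ in range(5): key = chr(ord('A') + v % 26) + key; v //= 26
def pvEncodeLoop : Nat → Int → List Char → List Char
  | 0, _, key => key
  | k + 1, v, key =>
      pvEncodeLoop k (PySem.Int.floordiv v 26) (Char.ofNat (65 + (PySem.Int.mod v 26)).toNat :: key)

def pvEncodeKey (v : Int) : String := String.ofList (pvEncodeLoop 5 v [])

def generate_sorted_names_alt (list_of_words : List String) : List (String × String) :=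
  let s := PySem.List.sorted list_of_words (fun x => x) false
  ((PySem.List.enumerate s 0).foldl
      (fun d p =>
        d.insert (pvEncodeKey (PySem.Int.mod (23 * (26 ^ 4 + 26 ^ 3 + 26 ^ 2 + 26 + 1) + p.1) (26 ^ 5))) p.2)
      PySem.Dict.empty).items

-- ===== PRECONDITION & SPEC =====
-- Pre_ excludes only the empty list, on which A raises IndexError (list_of_words[0]).
def Pre_generate_sorted_names (list_of_words : List String) : Prop := list_of_words ≠ []
instance (list_of_words : List String) : Decidable (Pre_generate_sorted_names list_of_words) := by
  unfold Pre_generate_sorted_names; infer_instance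

def pvWitness_generate_sorted_names : List String := ["banana", "apple"]

-- On the empty list A raises IndexError while B returns the empty dict.
def Raises_generate_sorted_names (list_of_words : List String) : Prop := list_of_words = []
instance (list_of_words : List String) : Decidable (Raises_generate_sorted_names list_of_words) := by
  unfold Raises_generate_sorted_names; infer_instance
def pvRaiseWitness_generate_sorted_names : List String := []
def pvRaiseWitnessOut_generate_sorted_names : List (String × String) := []

def Spec_generate_sorted_names (list_of_words : List String) (out : List (String × String)) : Prop :=
  out = generate_sorted_names_alt list_of_words
instance (list_of_words : List String) (out : List (String × String)) :
    Decidable (Spec_generate_sorted_names list_of_words out) := by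
  unfold Spec_generate_sorted_names; infer_instance

-- ===== CLAIM (what is proved, stated in full; the proofs are below) =====
def Claim_equal_generate_sorted_names : Prop := ∀ (list_of_words : List String), Dom_generate_sorted_names list_of_words → Pre_generate_sorted_names list_of_words → Spec_generate_sorted_names list_of_words (generate_sorted_names list_of_words)

def Claim_raises_generate_sorted_names : Prop := (∀ (list_of_words : List String), Dom_generate_sorted_names list_of_words → Raises_generate_sorted_names list_of_words → ¬ Pre_generate_sorted_names list_of_words) ∧ (Dom_generate_sorted_names (pvRaiseWitness_generate_sorted_names) ∧ Raises_generate_sorted_names (pvRaiseWitness_generate_sorted_names) ∧ generate_sorted_names_alt (pvRaiseWitness_generate_sorted_names) = pvRaiseWitnessOut_generate_sorted_names)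

-- ===== LEMMAS AND PROOFS =====

-- five base-26 digits of n, little-endian, as letters A..Z
def pvDigits : Nat → Nat → List Char
  | 0, _ => []
  | k + 1, n => Char.ofNat (65 + n % 26) :: pvDigits k (n / 26)

lemma pvDigits_mod : ∀ (k n : Nat), pvDigits k (n % 26 ^ k) = pvDigits k n := by
  intro k
  induction k with
  | zero => intro n; rfl
  | succ k ih =>
      intro n
      have h1 : n % 26 ^ (k + 1) % 26 = n % 26 := by
        have : (26 : Nat) ∣ 26 ^ (k + 1) := dvd_pow_self 26 (Nat.succ_ne_zero k)
        exact Nat.mod_mod_of_dvd n this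
      have h2 : n % 26 ^ (k + 1) / 26 = n / 26 % 26 ^ k := by
        have := Nat.mod_mul_right_div_self n 26 (26 ^ k)
        simpa [pow_succ, mul_comm] using this
      simp [pvDigits, h1, h2, ih]

lemma pvCharA_ne_Z (r : Nat) (hr : r < 26) (h25 : r ≠ 25) : Char.ofNat (65 + r) ≠ 'Z' := by
  interval_cases r <;> simp_all

lemma pvCharA_toNat (r : Nat) (hr : r < 26) : (Char.ofNat (65 + r)).toNat = 65 + r := by
  interval_cases r <;> decide

lemma pvIncrAux_digits : ∀ (k n : Nat), pvIncrAux (pvDigits k n) = pvDigits k (n + 1) := by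
  intro k
  induction k with
  | zero => intro n; rfl
  | succ k ih =>
      intro n
      by_cases h : n % 26 = 25
      · have hd : (n + 1) % 26 = 0 := by omega
        have hq : (n + 1) / 26 = n / 26 + 1 := by omega
        simp [pvDigits, pvIncrAux, h, hd, hq, ih]
      · have hlt : n % 26 < 26 := Nat.mod_lt _ (by norm_num)
        have hd : (n + 1) % 26 = n % 26 + 1 := by omega
        have hq : (n + 1) / 26 = n / 26 := by omega
        have hne := pvCharA_ne_Z (n % 26) hlt h
        simp [pvDigits, pvIncrAux, hne, hd, hq, pvCharA_toNat (n % 26) hlt,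
              Nat.add_assoc]

lemma pvIncrement_digits (n : Nat) :
    pvIncrementString (String.ofList (pvDigits 5 n).reverse) = String.ofList (pvDigits 5 (n + 1)).reverse := by
  simp [pvIncrementString, String.toList_ofList, pvIncrAux_digits]

lemma pvEncodeLoop_natCast : ∀ (k : Nat) (n : Nat) (acc : List Char),
    pvEncodeLoop k (n : Int) acc = (pvDigits k n).reverse ++ acc := by
  intro k
  induction k with
  | zero => intro n acc; rfl
  | succ k ih =>
      intro n acc
      have hm : PySem.Int.mod (n : Int) 26 = ((n % 26 : Nat) : Int) := by
        exact_mod_cast PySem.Int.mod_natCast n 26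
      have hf : PySem.Int.floordiv (n : Int) 26 = ((n / 26 : Nat) : Int) := by
        exact_mod_cast PySem.Int.floordiv_natCast n 26
      have ht : ((65:Int) + ((n % 26 : Nat) : Int)).toNat = 65 + n % 26 := by omega
      simp only [pvEncodeLoop, hm, hf, ht, ih, pvDigits, List.reverse_cons,
        List.append_assoc, List.cons_append, List.nil_append]

lemma pvEncodeKey_natCast (n : Nat) :
    pvEncodeKey ((n % 26 ^ 5 : Nat) : Int) = String.ofList (pvDigits 5 n).reverse := by
  rw [pvEncodeKey, pvEncodeLoop_natCast, pvDigits_mod]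
  simp

lemma pvBKey (i : Nat) :
    pvEncodeKey (PySem.Int.mod (23 * (26 ^ 4 + 26 ^ 3 + 26 ^ 2 + 26 + 1) + (i : Int)) (26 ^ 5))
      = String.ofList (pvDigits 5 (23 * (26 ^ 4 + 26 ^ 3 + 26 ^ 2 + 26 + 1) + i)).reverse := by
  have h : (23 * (26 ^ 4 + 26 ^ 3 + 26 ^ 2 + 26 + 1) + (i : Int))
      = ((23 * (26 ^ 4 + 26 ^ 3 + 26 ^ 2 + 26 + 1) + i : Nat) : Int) := by push_cast; rfl
  have h2 : ((26 : Int) ^ 5) = ((26 ^ 5 : Nat) : Int) := by norm_cast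
  rw [h, h2, PySem.Int.mod_natCast]
  exact pvEncodeKey_natCast _

lemma pvLoop_eq : ∀ (ws : List String) (i : Nat) (d : PySem.Dict String String),
    pvLoopA ws d (String.ofList (pvDigits 5 (23 * (26 ^ 4 + 26 ^ 3 + 26 ^ 2 + 26 + 1) + i)).reverse)
      = (PySem.List.enumerate ws (i : Int)).foldl
          (fun d p =>
            d.insert (pvEncodeKey (PySem.Int.mod (23 * (26 ^ 4 + 26 ^ 3 + 26 ^ 2 + 26 + 1) + p.1) (26 ^ 5))) p.2)
          d := by
  intro ws
  induction ws with
  | nil => intro i d; rfl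
  | cons w ws ih =>
      intro i d
      rw [PySem.List.enumerate_cons]
      have hstep := pvIncrement_digits (23 * (26 ^ 4 + 26 ^ 3 + 26 ^ 2 + 26 + 1) + i)
      have hcast : ((i : Int) + 1) = ((i + 1 : Nat) : Int) := by push_cast; rfl
      simp only [pvLoopA, List.foldl_cons, pvBKey, hstep, hcast]
      have := ih (i + 1) (d.insert (String.ofList (pvDigits 5 (23 * (26 ^ 4 + 26 ^ 3 + 26 ^ 2 + 26 + 1) + i)).reverse) w)
      simpa [Nat.add_assoc] using this

lemma pvStart : "XXXXX" = String.ofList (pvDigits 5 (23 * (26 ^ 4 + 26 ^ 3 + 26 ^ 2 + 26 + 1) + 0)).reverse := by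
  decide

-- ===== VERDICT (by name: the statement is the Claim_ definition above) =====
theorem generate_sorted_names_spec : Claim_equal_generate_sorted_names := by
  intro l _ _
  unfold Spec_generate_sorted_names generate_sorted_names generate_sorted_names_alt
  rw [pvStart, pvLoop_eq]
  norm_num

@[simp] theorem generate_sorted_names_raises : Claim_raises_generate_sorted_names := by
  unfold Claim_raises_generate_sorted_names
  exact ⟨fun l _ h => by simp [Pre_generate_sorted_names, Raises_generate_sorted_names] at h ⊢; exact h, by decide⟩
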